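-- pv_equiv track=rewrite | github.com/NetaSohlberg/genome-assembly | Genome Assembly.py | getAllOverlaps
-- ===== SOURCE A (Python) =====
-- def getOverlap(left, right):
--     #search the overlapping sequence (i runs from len(left) to 0.
--     for i in range(len(left))[::-1]:
--         #if there is a match- return the overlapping sequence
--         if right[:i]== left[len(left)-i:]:
--             return right[:i]
--     #If there is no overlap the function returns an empty string
--     return ""
--
-- def getAllOverlaps(reads):
--     #d is a dictionary of dictionaries
--     d={}
--     for i in reads:
--         d[i]={}
--         for j in reads:
--         #every value in d is the length of the overlapping sequence between sequence 'i' and sequence 'j'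
--             if i!=j:
--                 d[i][j]=len(getOverlap(reads[i],reads[j]))
--     return d
-- ===== SOURCE B (Python) =====
-- def _overlap_len(left, right):
--     # longest k < len(left) with right[:k] == left[len(left)-k:], via the
--     # KMP prefix-function of right + '\x00' + left (the sentinel never occurs
--     # in printable-ASCII reads).
--     if not left:
--         return 0
--     s = right + "\x00" + left
--     n = len(s)
--     pi = [0] * n
--     k = 0
--     for i in range(1, n):
--         c = s[i]
--         while k and s[k] != c:
--             k = pi[k - 1]
--         if s[k] == c:
--             k += 1
--         pi[i] = k
--     k = pi[n - 1]
--     if k == len(left):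
--         k = pi[k - 1]
--     return k
--
--
-- def getAllOverlaps(reads):
--     out = {}
--     for a, left in reads.items():
--         row = {}
--         for b, right in reads.items():
--             if a != b:
--                 row[b] = _overlap_len(left, right)
--         out[a] = row
--     return out
-- ===== Notes on version B (the rewrite author's own statement) =====
-- stated objective: alternative
-- what changed: Each pairwise overlap is computed by one KMP prefix-function pass over right+'\x00'+left (with one border-chain fallback when the whole left matches) instead of A's descending scan that re-slices and compares a fresh suffix/prefix pair at every candidate length; per pair this is O(L) character steps instead of O(L^2), though on short reads the measured wall-clock is comparable.
import Mathlib
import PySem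

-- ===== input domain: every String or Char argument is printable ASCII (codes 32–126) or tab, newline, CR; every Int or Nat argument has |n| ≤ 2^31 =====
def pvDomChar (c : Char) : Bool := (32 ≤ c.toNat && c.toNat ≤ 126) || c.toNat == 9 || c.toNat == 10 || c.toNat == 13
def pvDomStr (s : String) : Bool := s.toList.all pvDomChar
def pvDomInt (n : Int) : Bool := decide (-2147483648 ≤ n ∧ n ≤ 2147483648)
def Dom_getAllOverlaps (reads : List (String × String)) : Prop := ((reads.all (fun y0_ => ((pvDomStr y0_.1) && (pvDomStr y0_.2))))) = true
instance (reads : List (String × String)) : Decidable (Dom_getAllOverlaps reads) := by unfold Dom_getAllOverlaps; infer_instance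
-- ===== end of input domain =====

-- B replaces A's per-pair descending scan over all suffix lengths (each tested by a
-- quadratic slice comparison) with one KMP prefix-function pass over right+'\x00'+left.

-- ===== PORT A =====

-- 'for i in range(len(left))[::-1]: if right[:i] == left[len(left)-i:]: return right[:i]; return ""'
def pvGetOverlapGo (left right : String) : List Int → String
  | [] => ""
  | i :: rest =>
    if PySem.Str.slice right none (some i) = PySem.Str.slice left (some (PySem.Str.len left - i)) none
    then PySem.Str.slice right none (some i)
    else pvGetOverlapGo left right rest

-- range(len(left))[::-1] is the reversed range (PySem.List.slice?_none_none_neg_one)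
def pvGetOverlap (left right : String) : String :=
  pvGetOverlapGo left right (PySem.List.pyRange 0 (PySem.Str.len left) 1).reverse

-- d[i] = {}; inner loop mutates d[i]; finally the dict of dicts is returned as items
def getAllOverlaps (reads : List (String × String)) : List (String × List (String × Int)) :=
  (reads.foldl
    (fun (d : PySem.Dict String (PySem.Dict String Int)) i =>
      reads.foldl
        (fun d j =>
          if i.1 ≠ j.1 then
            d.insert i.1 ((d.getD i.1 PySem.Dict.empty).insert j.1
              (PySem.Str.len (pvGetOverlap (PySem.Dict.getD (PySem.Dict.mk reads) i.1 "")
                                           (PySem.Dict.getD (PySem.Dict.mk reads) j.1 ""))))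
          else d)
        (d.insert i.1 PySem.Dict.empty))
    PySem.Dict.empty).items.map (fun kv => (kv.1, kv.2.items))

-- ===== PORT B =====

def pvSep : Char := Char.ofNat 0

-- 'while k and s[k] != c: k = pi[k-1]' ; the 'min … j' only witnesses termination
-- (on every reachable state pi[j] ≤ j, so it changes nothing)
def pvDescend (s : List Char) (pi : List Nat) (c : Char) : Nat → Nat
  | 0 => 0
  | j + 1 =>
    if s.getD (j + 1) pvSep ≠ c then pvDescend s pi c (min (pi.getD j 0) j) else j + 1
termination_by k => k
decreasing_by omega

-- 'pi = [0]*n; k = 0; for i in range(1, n): …; pi[i] = k' — iterating i over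
-- range(1, n) with c = s[i] is exactly a fold over s.drop 1, and pi (written
-- left to right) is the list built by appending each k.
def pvPrefixFold (s : List Char) : List Nat × Nat :=
  (s.drop 1).foldl
    (fun st c =>
      let k1 := pvDescend s st.1 c st.2
      let k2 := if s.getD k1 pvSep = c then k1 + 1 else k1
      (st.1 ++ [k2], k2))
    ([0], 0)

def pvOverlapLen (left right : List Char) : Nat :=
  if left = [] then 0
  else
    let s := right ++ pvSep :: left
    let pi := (pvPrefixFold s).1
    let k := pi.getD (s.length - 1) 0
    if k = left.length then pi.getD (k - 1) 0 else k

def getAllOverlaps_alt (reads : List (String × String)) : List (String × List (String × Int)) :=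
  (reads.foldl
    (fun (out : PySem.Dict String (PySem.Dict String Int)) i =>
      out.insert i.1
        (reads.foldl
          (fun (row : PySem.Dict String Int) j =>
            if i.1 ≠ j.1 then row.insert j.1 ((pvOverlapLen i.2.toList j.2.toList : Nat) : Int)
            else row)
          PySem.Dict.empty))
    PySem.Dict.empty).items.map (fun kv => (kv.1, kv.2.items))

-- ===== PRECONDITION & SPEC =====

-- Pre_ excludes association lists with duplicate keys: they are not the encoding of any
-- Python dict (A's parameter is a dict), so no behaviour of A is defined for them.
def Pre_getAllOverlaps (reads : List (String × String)) : Prop := (reads.map Prod.fst).Nodup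
instance (reads : List (String × String)) : Decidable (Pre_getAllOverlaps reads) := by
  unfold Pre_getAllOverlaps; infer_instance

def pvWitness_getAllOverlaps : (List (String × String)) := [("r1", "abba"), ("r2", "baab")]

def Spec_getAllOverlaps (reads : List (String × String)) (out : List (String × List (String × Int))) : Prop := out = getAllOverlaps_alt reads
instance (reads : List (String × String)) (out : List (String × List (String × Int))) : Decidable (Spec_getAllOverlaps reads out) := by unfold Spec_getAllOverlaps; infer_instance

-- ===== CLAIM (what is proved, stated in full; the proofs are below) =====
def Claim_equal_getAllOverlaps : Prop := ∀ (reads : List (String × String)), Dom_getAllOverlaps reads → Pre_getAllOverlaps reads → Spec_getAllOverlaps reads (getAllOverlaps reads)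

-- ===== LEMMAS AND PROOFS =====
def pvBord (t : List Char) : Nat := Nat.findGreatest (fun b => t.take b <:+ t) (t.length - 1)

theorem pvBord_le (t : List Char) : pvBord t ≤ t.length - 1 := Nat.findGreatest_le _

theorem pvBord_suffix (t : List Char) : t.take (pvBord t) <:+ t := by
  unfold pvBord
  exact Nat.findGreatest_spec (P := fun b => t.take b <:+ t) (Nat.zero_le _) (by simp)

theorem pvLe_bord {t : List Char} {b : Nat} (hb : b ≤ t.length - 1) (h : t.take b <:+ t) :
    b ≤ pvBord t := Nat.le_findGreatest hb h

theorem pvFg_congr {P Q : Nat → Prop} [DecidablePred P] [DecidablePred Q] :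
    ∀ n, (∀ i, i ≤ n → (P i ↔ Q i)) → Nat.findGreatest P n = Nat.findGreatest Q n := by
  intro n
  induction n with
  | zero => intro _; rfl
  | succ m ih =>
    intro h
    rw [Nat.findGreatest_succ, Nat.findGreatest_succ]
    by_cases hp : P (m+1)
    · rw [if_pos hp, if_pos ((h _ le_rfl).mp hp)]
    · rw [if_neg hp, if_neg (fun hq => hp ((h _ le_rfl).mpr hq)), ih (fun i hi => h i (by omega))]

theorem pvFg_drop {P : Nat → Prop} [DecidablePred P] :
    ∀ n b, b ≤ n → (∀ i, b < i → i ≤ n → ¬ P i) → Nat.findGreatest P n = Nat.findGreatest P b := by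
  intro n
  induction n with
  | zero => intro b hb _; interval_cases b; rfl
  | succ m ih =>
    intro b hb h
    rcases Nat.eq_or_lt_of_le hb with rfl | hlt
    · rfl
    · rw [Nat.findGreatest_succ, if_neg (h _ hlt le_rfl)]
      exact ih b (by omega) (fun i h1 h2 => h i h1 (by omega))
theorem pvBorder_append_char {t : List Char} {c : Char} {j : Nat} (hj : j < t.length) :
    ((t ++ [c]).take (j+1) <:+ (t ++ [c])) ↔ (t.take j <:+ t ∧ t.getD j pvSep = c) := by
  have htake : (t ++ [c]).take (j+1) = t.take (j+1) :=
    List.take_append_of_le_length (by omega)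
  have hsucc : t.take (j+1) = t.take j ++ [t[j]] := by
    rw [List.take_add_one]
    simp [List.getElem?_eq_getElem hj]
  have hgetD : t.getD j pvSep = t[j] := List.getD_eq_getElem t pvSep hj
  have hdrop : (t ++ [c]).drop (t.length - j) = t.drop (t.length - j) ++ [c] :=
    List.drop_append_of_le_length (by omega)
  constructor
  · intro h
    rw [htake] at h
    rw [List.suffix_iff_eq_drop] at h
    have hlen : (t.take (j+1)).length = j + 1 := by rw [List.length_take]; omega
    rw [hlen] at h
    have hlen3 : (t ++ [c]).length - (j+1) = t.length - j := by simp only [List.length_append, List.length_singleton]; omega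
    rw [hlen3, hdrop, hsucc] at h
    obtain ⟨h1, h2⟩ := List.append_inj h (by rw [List.length_take, List.length_drop]; omega)
    have hc : t[j] = c := by simpa using h2
    refine ⟨?_, by rw [hgetD, hc]⟩
    rw [List.suffix_iff_eq_drop, List.length_take]
    rw [min_eq_left (by omega)]
    exact h1
  · rintro ⟨h1, h2⟩
    rw [htake, hsucc]
    rw [List.suffix_iff_eq_drop] at h1
    rw [List.length_take, min_eq_left (by omega)] at h1
    rw [h1, hgetD.symm, h2, ← hdrop]
    exact List.drop_suffix _ _
theorem pvSplit_unique {x₁ x₂ y₁ y₂ : List Char}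
    (h1 : pvSep ∉ x₁) (h2 : pvSep ∉ x₂) :
    ∀ (h : x₁ ++ pvSep :: y₁ = x₂ ++ pvSep :: y₂), x₁ = x₂ ∧ y₁ = y₂ := by
  induction x₁ generalizing x₂ with
  | nil =>
    intro h
    cases x₂ with
    | nil => simpa using h
    | cons a x₂ =>
      exfalso
      simp only [List.nil_append, List.cons_append, List.cons.injEq] at h
      exact h2 (by rw [← h.1]; exact List.mem_cons_self)
  | cons a x₁ ih =>
    intro h
    cases x₂ with
    | nil =>
      exfalso
      simp only [List.nil_append, List.cons_append, List.cons.injEq] at h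
      exact h1 (by rw [h.1]; exact List.mem_cons_self)
    | cons b x₂ =>
      simp only [List.cons_append, List.cons.injEq] at h
      obtain ⟨hab, hrest⟩ := h
      have := ih (fun hm => h1 (List.mem_cons_of_mem _ hm)) (fun hm => h2 (List.mem_cons_of_mem _ hm)) hrest
      exact ⟨by rw [hab, this.1], this.2⟩

theorem pvBorder_iff_overlap {R L : List Char} (hR : pvSep ∉ R) (hL : pvSep ∉ L)
    {b : Nat} (hb : b < (R ++ pvSep :: L).length) :
    ((R ++ pvSep :: L).take b <:+ (R ++ pvSep :: L)) ↔
      (b ≤ R.length ∧ b ≤ L.length ∧ R.take b <:+ L) := by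
  have hn : (R ++ pvSep :: L).length = R.length + 1 + L.length := by simp; omega
  constructor
  · intro h
    have hdr := List.suffix_iff_eq_drop.mp h
    rw [List.length_take, min_eq_left (by omega)] at hdr
    by_cases hbR : b ≤ R.length
    · have hA : (R ++ pvSep :: L).take b = R.take b := List.take_append_of_le_length hbR
      by_cases hbL : b ≤ L.length
      · -- good case
        have hC : (R ++ pvSep :: L).drop ((R ++ pvSep :: L).length - b) = L.drop (L.length - b) := by
          rw [List.drop_append]
          rw [List.drop_of_length_le (by omega)]
          have h1 : (R ++ pvSep :: L).length - b - R.length = L.length - b + 1 := by omega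
          rw [h1]
          simp
        rw [hA, hC] at hdr
        refine ⟨hbR, hbL, ?_⟩
        rw [List.suffix_iff_eq_drop, List.length_take, min_eq_left (by omega)]
        exact hdr
      · -- b ≤ |R|, b > |L| : the suffix contains the sentinel, R.take b does not
        exfalso
        have hD : (R ++ pvSep :: L).drop ((R ++ pvSep :: L).length - b) =
            R.drop ((R ++ pvSep :: L).length - b) ++ pvSep :: L := by
          rw [List.drop_append]
          have h1 : ((R ++ pvSep :: L).length - b) - R.length = 0 := by omega
          rw [h1, List.drop_zero]
        rw [hA, hD] at hdr
        have : pvSep ∈ R.take b := by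
          rw [hdr]
          exact List.mem_append_right _ List.mem_cons_self
        exact hR (List.mem_of_mem_take this)
    · have hB : (R ++ pvSep :: L).take b = R ++ pvSep :: L.take (b - R.length - 1) := by
        rw [List.take_append]
        rw [List.take_of_length_le (by omega)]
        have h1 : b - R.length = (b - R.length - 1) + 1 := by omega
        rw [h1]
        simp
      by_cases hbL : b ≤ L.length
      · -- b > |R|, b ≤ |L| : the prefix contains the sentinel, the suffix is inside L
        exfalso
        have hC : (R ++ pvSep :: L).drop ((R ++ pvSep :: L).length - b) = L.drop (L.length - b) := by
          rw [List.drop_append]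
          rw [List.drop_of_length_le (by omega)]
          have h1 : (R ++ pvSep :: L).length - b - R.length = L.length - b + 1 := by omega
          rw [h1]
          simp
        rw [hB, hC] at hdr
        have : pvSep ∈ L.drop (L.length - b) := by
          rw [← hdr]
          exact List.mem_append_right _ List.mem_cons_self
        exact hL (List.mem_of_mem_drop this)
      · -- b > |R|, b > |L| : two sentinel decompositions force b = length, impossible
        exfalso
        have hD : (R ++ pvSep :: L).drop ((R ++ pvSep :: L).length - b) =
            R.drop ((R ++ pvSep :: L).length - b) ++ pvSep :: L := by
          rw [List.drop_append]
          have h1 : ((R ++ pvSep :: L).length - b) - R.length = 0 := by omega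
          rw [h1, List.drop_zero]
        rw [hB, hD] at hdr
        have hsp := pvSplit_unique hR (fun hm => hR (List.mem_of_mem_drop hm)) hdr
        have hlen1 : R.length = R.length - ((R ++ pvSep :: L).length - b) := by
          conv_lhs => rw [hsp.1]
          rw [List.length_drop]
        have hlen2 : (L.take (b - R.length - 1)).length = L.length := by rw [hsp.2]
        rw [List.length_take] at hlen2
        omega
  · rintro ⟨hbR, hbL, hov⟩
    have hA : (R ++ pvSep :: L).take b = R.take b := List.take_append_of_le_length hbR
    rw [hA]
    exact hov.trans ((List.suffix_cons pvSep L).trans (List.suffix_append R _))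
theorem pvTake_take_eq {s : List Char} {a m : Nat} (h : a ≤ m) : (s.take m).take a = s.take a := by
  rw [List.take_take, min_eq_left h]

theorem pvGetD_take {s : List Char} {j m : Nat} (hj : j < m) (hm : m ≤ s.length) :
    (s.take m).getD j pvSep = s.getD j pvSep := by
  rw [List.getD_eq_getElem _ _ (by rw [List.length_take]; omega),
      List.getD_eq_getElem _ _ (by omega)]
  exact List.getElem_take

theorem pvLength_take {s : List Char} {m : Nat} (hm : m ≤ s.length) : (s.take m).length = m := by
  rw [List.length_take]; omega

theorem pvDescend_eq (s : List Char) (pi : List Nat) (c : Char) (m : Nat)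
    (hm : m ≤ s.length)
    (hpi : ∀ j, j < m → pi.getD j 0 = pvBord (s.take (j+1))) :
    ∀ k, k < m → s.take k <:+ s.take m →
      pvDescend s pi c k =
        Nat.findGreatest (fun j => s.take j <:+ s.take m ∧ (j = 0 ∨ s.getD j pvSep = c)) k := by
  intro k
  induction k using Nat.strong_induction_on with
  | _ k ih =>
    match k with
    | 0 => intro _ _; rw [pvDescend, Nat.findGreatest_zero]
    | j + 1 =>
      intro hk hsuf
      rw [pvDescend]
      by_cases hc : s.getD (j+1) pvSep = c
      · rw [if_neg (by simpa using hc)]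
        rw [Nat.findGreatest_succ, if_pos ⟨hsuf, Or.inr hc⟩]
      · rw [if_pos (by simpa using hc)]
        have hbj := hpi j (by omega)
        have hlen : (s.take (j+1)).length = j + 1 := pvLength_take (by omega)
        have hble : pvBord (s.take (j+1)) ≤ j := by
          have := pvBord_le (s.take (j+1)); omega
        set bj := pvBord (s.take (j+1)) with hbjdef
        have hmin : min (pi.getD j 0) j = bj := by rw [hbj]; omega
        rw [hmin]
        -- the recursive argument still encodes a take-suffix of s.take m
        have hbsuf : s.take bj <:+ s.take m := by
          have h1 := pvBord_suffix (s.take (j+1))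
          rw [pvTake_take_eq (by omega)] at h1
          exact h1.trans hsuf
        rw [ih bj (by omega) (by omega) hbsuf]
        -- no border between bj and j+1 satisfies the predicate
        refine (pvFg_drop (j+1) bj (by omega) ?_).symm
        intro i h1 h2 hP
        obtain ⟨hPs, hPc⟩ := hP
        rcases Nat.eq_or_lt_of_le h2 with rfl | hij
    -- i = j+1 : character mismatch
        · rcases hPc with h0 | hcc
          · omega
          · exact hc hcc
        -- i ≤ j : i would be a larger border of s.take (j+1)
        · have hsi : s.take i <:+ s.take (j+1) := by
            have := List.suffix_of_suffix_length_le hPs hsuf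
              (by rw [List.length_take, List.length_take]; omega)
            exact this
          have : i ≤ bj := by
            refine pvLe_bord (by omega) ?_
            rwa [pvTake_take_eq (by omega)]
          omega

theorem pvStep (s : List Char) (pi : List Nat) (c : Char) (i : Nat)
    (hi1 : 1 ≤ i) (hi : i < s.length) (hc : c = s.getD i pvSep)
    (hpi : ∀ j, j < i → pi.getD j 0 = pvBord (s.take (j+1))) :
    (if s.getD (pvDescend s pi c (pvBord (s.take i))) pvSep = c
       then pvDescend s pi c (pvBord (s.take i)) + 1
       else pvDescend s pi c (pvBord (s.take i))) = pvBord (s.take (i+1)) := by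
  have hlent : (s.take i).length = i := pvLength_take (by omega)
  have hlenu : (s.take (i+1)).length = i + 1 := pvLength_take (by omega)
  have hk_lt : pvBord (s.take i) < i := by have := pvBord_le (s.take i); omega
  have hksuf : s.take (pvBord (s.take i)) <:+ s.take i := by
    have h1 := pvBord_suffix (s.take i)
    rwa [pvTake_take_eq (by omega)] at h1
  have hdes := pvDescend_eq s pi c i (by omega) hpi (pvBord (s.take i)) hk_lt hksuf
  set P : Nat → Prop := fun j => s.take j <:+ s.take i ∧ (j = 0 ∨ s.getD j pvSep = c) with hP
  rw [hdes]
  set k1 := Nat.findGreatest P (pvBord (s.take i)) with hk1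
  have hP0 : P 0 := ⟨by simp, Or.inl rfl⟩
  have hPk1 : P k1 := by
    rw [hk1]
    exact Nat.findGreatest_spec (P := P) (Nat.zero_le _) hP0
  have hk1le : k1 ≤ pvBord (s.take i) := by rw [hk1]; exact Nat.findGreatest_le _
  -- s.take (i+1) = s.take i ++ [s.getD i pvSep]
  have hsucc : s.take (i+1) = s.take i ++ [s.getD i pvSep] := by
    rw [List.take_add_one]
    rw [List.getD_eq_getElem _ _ (by omega)]
    simp [List.getElem?_eq_getElem hi]
  -- border of s.take (i+1) of positive length j+1 ↔ P' j
  have hchar : ∀ j, j < i →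
      ((s.take (i+1)).take (j+1) <:+ s.take (i+1) ↔
        (s.take j <:+ s.take i ∧ s.getD j pvSep = s.getD i pvSep)) := by
    intro j hj
    rw [hsucc]
    rw [pvBorder_append_char (by omega)]
    constructor
    · rintro ⟨h1, h2⟩
      rw [pvTake_take_eq (by omega)] at h1
      rw [pvGetD_take hj (by omega)] at h2
      exact ⟨h1, h2⟩
    · rintro ⟨h1, h2⟩
      refine ⟨?_, ?_⟩
      · rwa [pvTake_take_eq (by omega)]
      · rwa [pvGetD_take hj (by omega)]
  by_cases hmatch : s.getD k1 pvSep = c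
  · rw [if_pos hmatch]
    -- k1+1 is a border of s.take (i+1), and no longer one exists
    have hb1 : (s.take (i+1)).take (k1+1) <:+ s.take (i+1) := by
      rw [hchar k1 (by omega)]
      exact ⟨hPk1.1, by rw [hmatch, hc]⟩
    have hle1 : k1 + 1 ≤ pvBord (s.take (i+1)) := pvLe_bord (by omega) hb1
    have hle2 : pvBord (s.take (i+1)) ≤ k1 + 1 := by
      rcases Nat.eq_zero_or_pos (pvBord (s.take (i+1))) with h0 | hpos
      · omega
      · obtain ⟨j, hj⟩ := Nat.exists_eq_add_of_lt hpos
        have hB := pvBord_suffix (s.take (i+1))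
        have hBle : pvBord (s.take (i+1)) ≤ i := by have := pvBord_le (s.take (i+1)); omega
        have hjlt : j < i := by omega
        rw [hj, Nat.zero_add] at hB hBle ⊢
        rw [hchar j hjlt] at hB
        have hjP : P j := ⟨hB.1, Or.inr (by rw [hB.2, ← hc])⟩
        have hjlek : j ≤ pvBord (s.take i) := by
          refine pvLe_bord (by omega) ?_
          rw [pvTake_take_eq (by omega)]
          exact hB.1
        have : j ≤ k1 := by
          rw [hk1]
          exact Nat.le_findGreatest hjlek hjP
        omega
    omega
  · rw [if_neg hmatch]
    have hk10 : k1 = 0 := by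
      rcases hPk1.2 with h0 | hcc
      · exact h0
      · exact absurd hcc hmatch
    rw [hk10]
    symm
    rw [pvBord, Nat.findGreatest_eq_zero_iff]
    intro b hb0 hble hb
    rw [hlenu] at hble
    obtain ⟨j, rfl⟩ := Nat.exists_eq_add_of_lt hb0
    simp only [Nat.zero_add] at hb hble
    rw [hchar j (by omega)] at hb
    have hjP : P j := ⟨hb.1, Or.inr (by rw [hb.2, ← hc])⟩
    have hjlek : j ≤ pvBord (s.take i) := by
      refine pvLe_bord (by omega) ?_
      rw [pvTake_take_eq (by omega)]
      exact hb.1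
    have : j ≤ k1 := by
      rw [hk1]
      exact Nat.le_findGreatest hjlek hjP
    rw [hk10] at this
    have hj0 : j = 0 := by omega
    rw [hj0] at hb
    rw [hk10] at hmatch
    exact hmatch (hb.2.trans hc.symm)
theorem pvPrefixFold_aux (s : List Char) (h0 : 1 ≤ s.length) :
    ∀ m, m ≤ s.length - 1 →
      ((s.drop 1).take m).foldl
        (fun st c =>
          let k1 := pvDescend s st.1 c st.2
          let k2 := if s.getD k1 pvSep = c then k1 + 1 else k1
          (st.1 ++ [k2], k2))
        ([0], 0) =
      ((List.range (m+1)).map (fun j => pvBord (s.take (j+1))), pvBord (s.take (m+1))) := by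
  intro m
  induction m with
  | zero =>
    intro _
    have h1 : pvBord (s.take 1) = 0 := by
      have : (s.take 1).length = 1 := pvLength_take h0
      rw [pvBord, this]
      rfl
    simp [h1]
  | succ m ih =>
    intro hm
    have hdlen : (s.drop 1).length = s.length - 1 := by rw [List.length_drop]
    have hmlt : m < (s.drop 1).length := by omega
    have htake : (s.drop 1).take (m+1) = (s.drop 1).take m ++ [(s.drop 1)[m]] := by
      rw [List.take_add_one]
      simp [List.getElem?_eq_getElem hmlt]
    have hget : (s.drop 1)[m]'hmlt = s.getD (m+1) pvSep := by
      rw [List.getElem_drop]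
      rw [List.getD_eq_getElem _ _ (by omega)]
      congr 1
      omega
    rw [htake, List.foldl_append, ih (by omega)]
    simp only [List.foldl_cons, List.foldl_nil]
    have hpi : ∀ j, j < m + 1 →
        ((List.range (m+1)).map (fun j => pvBord (s.take (j+1)))).getD j 0 = pvBord (s.take (j+1)) := by
      intro j hj
      exact PySem.List.getD_map_range _ _ _ _ hj
    have hstep := pvStep s ((List.range (m+1)).map (fun j => pvBord (s.take (j+1))))
      (s.getD (m+1) pvSep) (m+1) (by omega) (by omega) rfl hpi
    rw [hget]
    simp only at hstep ⊢
    rw [hstep]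
    congr 1
    simp [List.range_succ]
theorem pvPrefixFold_pi (s : List Char) (h0 : 1 ≤ s.length) :
    (pvPrefixFold s).1 = (List.range s.length).map (fun j => pvBord (s.take (j+1))) := by
  have hdlen : (s.drop 1).length = s.length - 1 := by rw [List.length_drop]
  have haux := pvPrefixFold_aux s h0 (s.length - 1) le_rfl
  rw [List.take_of_length_le (by omega)] at haux
  unfold pvPrefixFold
  rw [haux]
  have h1 : s.length - 1 + 1 = s.length := by omega
  rw [h1]

-- A's slice test at suffix length i, as prefix/suffix data
theorem pvC_iff {L R : List Char} {i : Nat} (hi : i < L.length) :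
    (R.take i = L.drop (L.length - i)) ↔ (i ≤ R.length ∧ R.take i <:+ L) := by
  constructor
  · intro h
    have hlen : (R.take i).length = (L.drop (L.length - i)).length := by rw [h]
    rw [List.length_take, List.length_drop] at hlen
    have hiR : i ≤ R.length := by omega
    exact ⟨hiR, by rw [h]; exact List.drop_suffix _ _⟩
  · rintro ⟨hiR, hsuf⟩
    have h := List.suffix_iff_eq_drop.mp hsuf
    rwa [List.length_take, min_eq_left hiR] at h

theorem pvOverlapLen_eq {L R : List Char} (hL : pvSep ∉ L) (hR : pvSep ∉ R) :
    pvOverlapLen L R =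
      if L.length = 0 then 0
      else Nat.findGreatest (fun i => R.take i = L.drop (L.length - i)) (L.length - 1) := by
  by_cases hL0 : L = []
  · subst hL0; simp [pvOverlapLen]
  have hll : 0 < L.length := List.length_pos_of_ne_nil hL0
  set s := R ++ pvSep :: L with hs
  have hn : s.length = R.length + 1 + L.length := by simp [hs]; omega
  have hpi := pvPrefixFold_pi s (by omega)
  rw [if_neg (by omega)]
  unfold pvOverlapLen
  rw [if_neg hL0]
  simp only [← hs, hpi]
  have hk : ((List.range s.length).map (fun j => pvBord (s.take (j+1)))).getD (s.length - 1) 0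
      = pvBord s := by
    rw [PySem.List.getD_map_range _ _ _ _ (by omega)]
    have h1 : s.length - 1 + 1 = s.length := by omega
    rw [h1, List.take_length]
  rw [hk]
  have hKle : pvBord s ≤ s.length - 1 := pvBord_le s
  have hKov : pvBord s ≤ R.length ∧ pvBord s ≤ L.length ∧ R.take (pvBord s) <:+ L :=
    (pvBorder_iff_overlap hR hL (by rw [← hs]; omega)).mp (pvBord_suffix s)
  by_cases hKll : pvBord s = L.length
  · rw [if_pos hKll]
    have hgl : ((List.range s.length).map (fun j => pvBord (s.take (j+1)))).getD (pvBord s - 1) 0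
        = pvBord (s.take (pvBord s)) := by
      rw [PySem.List.getD_map_range _ _ _ _ (by omega)]
      have h1 : pvBord s - 1 + 1 = pvBord s := by omega
      rw [h1]
    rw [hgl]
    have hstake : s.take (pvBord s) = R.take (pvBord s) := by
      rw [hs]; exact List.take_append_of_le_length hKov.1
    have hRL : R.take L.length = L := by
      refine List.IsSuffix.eq_of_length (by rw [← hKll]; exact hKov.2.2) ?_
      rw [List.length_take]; omega
    rw [hstake, hKll, hRL]
    unfold pvBord
    refine pvFg_congr _ (fun i hi => ?_)
    have hiL : i < L.length := by omega
    rw [pvC_iff hiL]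
    have hRi : R.take i = L.take i := by
      rw [← hRL, List.take_take, min_eq_left (by omega)]
    constructor
    · intro h; exact ⟨by omega, by rwa [hRi]⟩
    · rintro ⟨_, h⟩; rwa [← hRi]
  · rw [if_neg hKll]
    have hKlt : pvBord s < L.length := lt_of_le_of_ne hKov.2.1 hKll
    refine le_antisymm ?_ ?_
    · exact Nat.le_findGreatest (by omega) ((pvC_iff hKlt).mpr ⟨hKov.1, hKov.2.2⟩)
    · set F := Nat.findGreatest (fun i => R.take i = L.drop (L.length - i)) (L.length - 1) with hF
      have hFle : F ≤ L.length - 1 := Nat.findGreatest_le _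
      have hCF : R.take F = L.drop (L.length - F) := by
        rw [hF]
        exact Nat.findGreatest_spec (P := fun i => R.take i = L.drop (L.length - i)) (m := 0) (Nat.zero_le _) (by simp)
      have hFlt : F < L.length := by omega
      have hov := (pvC_iff hFlt).mp hCF
      have hborder : s.take F <:+ s :=
        (pvBorder_iff_overlap hR hL (by rw [← hs]; omega)).mpr ⟨hov.1, by omega, hov.2⟩
      exact pvLe_bord (by omega) hborder
-- A's loop over the reversed range returns the largest matching suffix length
theorem pvGetOverlapGo_len (left right : String) :
    ∀ m, m ≤ left.toList.length →
      PySem.Str.len (pvGetOverlapGo left right (List.map (fun k : Nat => (k : Int)) (List.range m)).reverse) =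
        ((if m = 0 then 0
          else Nat.findGreatest
            (fun i => right.toList.take i = left.toList.drop (left.toList.length - i)) (m - 1) : Nat) : Int) := by
  intro m
  induction m with
  | zero =>
    intro _
    simp [pvGetOverlapGo, PySem.Str.len]
  | succ m ih =>
    intro hm
    rw [List.range_succ, List.map_append, List.reverse_append]
    simp only [List.map_cons, List.map_nil, List.reverse_cons, List.reverse_nil,
      List.nil_append, List.cons_append, List.singleton_append]
    rw [pvGetOverlapGo]
    have hcond : (PySem.Str.slice right none (some (m : Int)) =
        PySem.Str.slice left (some (PySem.Str.len left - (m : Int))) none) ↔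
        (right.toList.take m = left.toList.drop (left.toList.length - m)) := by
      constructor
      · intro h
        have := congrArg String.toList h
        rw [PySem.Str.toList_slice, PySem.Str.toList_slice] at this
        rw [PySem.Chars.slice_eq_listSlice, PySem.Chars.slice_eq_listSlice] at this
        rw [PySem.List.slice_to_natCast] at this
        rw [PySem.Str.len_eq] at this
        have hcast : (left.toList.length : Int) - (m : Int) = ((left.toList.length - m : Nat) : Int) := by
          omega
        rw [hcast, PySem.List.slice_from_natCast] at this
        exact this
      · intro h
        apply String.toList_inj.mp
        rw [PySem.Str.toList_slice, PySem.Str.toList_slice]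
        rw [PySem.Chars.slice_eq_listSlice, PySem.Chars.slice_eq_listSlice]
        rw [PySem.List.slice_to_natCast, PySem.Str.len_eq]
        have hcast : (left.toList.length : Int) - (m : Int) = ((left.toList.length - m : Nat) : Int) := by
          omega
        rw [hcast, PySem.List.slice_from_natCast]
        exact h
    by_cases hc : right.toList.take m = left.toList.drop (left.toList.length - m)
    · rw [if_pos (hcond.mpr hc)]
      -- returned slice has length m (the matched suffix has exactly m characters)
      have hlen : (PySem.Str.slice right none (some (m : Int))).toList = right.toList.take m := by
        rw [PySem.Str.toList_slice, PySem.Chars.slice_eq_listSlice, PySem.List.slice_to_natCast]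
      have hlm : (right.toList.take m).length = m := by
        rw [hc, List.length_drop]; omega
      rw [PySem.Str.len_eq, hlen, hlm]
      rw [if_neg (by omega)]
      congr 1
      cases m with
      | zero => rfl
      | succ m' =>
        rw [Nat.succ_sub_one]
        rw [Nat.findGreatest_succ, if_pos hc]
    · rw [if_neg (fun h => hc (hcond.mp h))]
      rw [ih (by omega)]
      cases m with
      | zero => exact absurd (by simp) hc
      | succ m' =>
        rw [if_neg (by omega), if_neg (by omega)]
        rw [Nat.succ_sub_one, Nat.succ_sub_one, Nat.findGreatest_succ, if_neg hc]

theorem pvGetOverlap_len (left right : String) :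
    PySem.Str.len (pvGetOverlap left right) =
      ((if left.toList.length = 0 then 0
        else Nat.findGreatest
          (fun i => right.toList.take i = left.toList.drop (left.toList.length - i))
          (left.toList.length - 1) : Nat) : Int) := by
  unfold pvGetOverlap
  rw [PySem.Str.len_eq]
  rw [show PySem.List.pyRange 0 (PySem.Str.len left) 1 =
      List.map (fun k : Nat => (k : Int)) (List.range left.toList.length) by
    rw [PySem.Str.len_eq]; exact PySem.List.pyRange_zero_natCast _]
  rw [← PySem.Str.len_eq]
  exact pvGetOverlapGo_len left right left.toList.length le_rfl
theorem pvOverlap_len_eq' (left right : String)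
    (hL : pvSep ∉ left.toList) (hR : pvSep ∉ right.toList) :
    PySem.Str.len (pvGetOverlap left right) = ((pvOverlapLen left.toList right.toList : Nat) : Int) := by
  rw [pvGetOverlap_len, pvOverlapLen_eq hL hR]

theorem pvInsert_insert {κ ν : Type} [BEq κ] [LawfulBEq κ] (d : PySem.Dict κ ν) (k : κ) (v w : ν) :
    (d.insert k v).insert k w = d.insert k w := by
  apply PySem.Dict.ext
  by_cases hc : d.contains k = true
  · rw [PySem.Dict.items_insert_of_contains _ w (PySem.Dict.contains_insert_self d k v)]
    rw [PySem.Dict.items_insert_of_contains _ v hc]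
    rw [PySem.Dict.items_insert_of_contains _ w hc]
    rw [List.map_map]
    apply List.map_congr_left
    intro p _
    by_cases hp : p.1 == k
    · simp [hp]
    · simp [hp]
  · have hc' : d.contains k = false := eq_false_of_ne_true hc
    rw [PySem.Dict.items_insert_of_contains _ w (PySem.Dict.contains_insert_self d k v)]
    rw [PySem.Dict.items_insert_of_not_contains _ v hc']
    rw [PySem.Dict.items_insert_of_not_contains _ w hc']
    rw [List.map_append]
    have hmap : d.items.map (fun p => if p.1 == k then (k, w) else p) = d.items := by
      conv_rhs => rw [← List.map_id d.items]
      apply List.map_congr_left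
      intro p hp
      have hf : (p.1 == k) = false := by
        by_contra hne
        have h1 : p.1 == k := by simpa using hne
        have : d.contains k = true := by
          rw [PySem.Dict.contains_iff_mem_keys]
          have := PySem.Dict.mem_keys_of_mem_items (d := d) (p := p) hp
          rwa [← eq_of_beq h1]
        rw [this] at hc'
        exact absurd hc' (by simp)
      simp [hf]
    rw [hmap]
    simp

theorem pvInner (i : String × String) (val : String × String → Int) :
    ∀ (l : List (String × String)) (d : PySem.Dict String (PySem.Dict String Int))
      (r0 : PySem.Dict String Int),
      l.foldl
        (fun d j =>
          if i.1 ≠ j.1 then d.insert i.1 ((d.getD i.1 PySem.Dict.empty).insert j.1 (val j)) else d)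
        (d.insert i.1 r0)
      = d.insert i.1
          (l.foldl (fun r j => if i.1 ≠ j.1 then r.insert j.1 (val j) else r) r0) := by
  intro l
  induction l with
  | nil => intro d r0; rfl
  | cons j l ih =>
    intro d r0
    simp only [List.foldl_cons]
    by_cases hij : i.1 ≠ j.1
    · rw [if_pos hij, if_pos hij]
      rw [PySem.Dict.getD_insert_self, pvInsert_insert]
      exact ih d _
    · rw [if_neg hij, if_neg hij]
      exact ih d r0

theorem pvLookup (reads : List (String × String)) (hpre : (reads.map Prod.fst).Nodup)
    {p : String × String} (hp : p ∈ reads) :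
    PySem.Dict.getD (PySem.Dict.mk reads) p.1 "" = p.2 := by
  have h1 : (p.1, p.2) ∈ (PySem.Dict.mk reads).items := by simpa using hp
  exact PySem.Dict.getD_of_mem_items _ h1 (by simpa using hpre) ""

theorem pvNoSep {s : String} (h : pvDomStr s = true) : pvSep ∉ s.toList := by
  intro hm
  have h1 := List.all_eq_true.mp h _ hm
  exact absurd h1 (by decide)
-- ===== VERDICT (by name: the statement is the Claim_ definition above) =====
set_option maxHeartbeats 1600000 in
theorem getAllOverlaps_spec : Claim_equal_getAllOverlaps := by
  intro reads hdom hpre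
  unfold Spec_getAllOverlaps getAllOverlaps getAllOverlaps_alt
  have hD := List.all_eq_true.mp hdom
  refine congrArg (fun (d : PySem.Dict String (PySem.Dict String Int)) =>
    d.items.map (fun kv => (kv.1, kv.2.items))) ?_
  apply PySem.List.foldl_congr_mem
  intro d i hi
  rw [pvInner i (fun j => PySem.Str.len (pvGetOverlap
        (PySem.Dict.getD (PySem.Dict.mk reads) i.1 "")
        (PySem.Dict.getD (PySem.Dict.mk reads) j.1 ""))) reads d PySem.Dict.empty]
  congr 1
  apply PySem.List.foldl_congr_mem
  intro r j hj
  by_cases hij : i.1 ≠ j.1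
  · rw [if_pos hij, if_pos hij]
    congr 1
    rw [pvLookup reads hpre hi, pvLookup reads hpre hj]
    have hdi : pvDomStr i.2 = true := ((Bool.and_eq_true _ _).mp (hD i hi)).2
    have hdj : pvDomStr j.2 = true := ((Bool.and_eq_true _ _).mp (hD j hj)).2
    exact pvOverlap_len_eq' i.2 j.2 (pvNoSep hdi) (pvNoSep hdj)
  · rw [if_neg hij, if_neg hij]
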